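-- pv_equiv track=rewrite | github.com/Seregawpn/Nexy_server | server/integrations/core/assistant_response_parser.py | _normalize_command
-- ===== SOURCE A (Python) =====
-- from typing import Dict, Any, Optional, Tuple, Union
--
-- def _normalize_command(command: Any) -> Any:
--     """Нормализует имя команды к каноническому виду"""
--     if not isinstance(command, str):
--         return command
--     normalized = command.strip().lower()
--     normalized = normalized.replace("-", "_").replace(".", "_").replace(" ", "_")
--     while "__" in normalized:
--         normalized = normalized.replace("__", "_")
--     return normalized
-- ===== SOURCE B (Python) =====
-- def _normalize_command(command):
--     """Normalize a command name to canonical form (single accumulator pass)."""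
--     if not isinstance(command, str):
--         return command
--     s = command.strip().lower()
--     out = []
--     for ch in s:
--         if ch == "-" or ch == "." or ch == " ":
--             ch = "_"
--         if ch == "_" and out and out[-1] == "_":
--             continue
--         out.append(ch)
--     return "".join(out)
-- ===== Notes on version B (the rewrite author's own statement) =====
-- stated objective: alternative
-- what changed: Replaces the three chained replace() passes plus the while loop that repeatedly rescans and rebuilds the string to collapse runs of underscores with a single left-to-right accumulator pass that maps hyphen, dot and space to underscore and skips an underscore appended right after another underscore.
import Mathlib
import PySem

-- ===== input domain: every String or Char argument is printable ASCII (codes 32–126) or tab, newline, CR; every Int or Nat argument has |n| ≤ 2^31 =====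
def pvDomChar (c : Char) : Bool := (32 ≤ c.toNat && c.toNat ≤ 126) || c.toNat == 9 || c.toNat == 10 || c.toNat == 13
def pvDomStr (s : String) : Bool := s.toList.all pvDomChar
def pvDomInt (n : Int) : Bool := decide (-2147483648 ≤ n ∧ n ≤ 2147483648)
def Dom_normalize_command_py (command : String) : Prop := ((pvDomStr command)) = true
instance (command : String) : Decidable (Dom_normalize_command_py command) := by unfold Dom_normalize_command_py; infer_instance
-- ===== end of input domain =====

-- B replaces A's chained replace() passes and repeated underscore-collapsing rescans with one left-to-right accumulator pass (alternative single-pass algorithm; no speed claim).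


-- ===== PORT A =====
-- The definitions/lemmas down to pvLoop_dec exist only to justify the termination of the
-- while loop pvWhileDD below (the port itself computes with PySem.Str.replace/isIn).
def pvRepDD : List Char → List Char
  | [] => []
  | [c] => [c]
  | c :: c2 :: t => if c = '_' ∧ c2 = '_' then '_' :: pvRepDD t else c :: pvRepDD (c2 :: t)

def pvHasDD : List Char → Bool
  | [] => false
  | [_] => false
  | c :: c2 :: t => if c = '_' ∧ c2 = '_' then true else pvHasDD (c2 :: t)

theorem pvReplaceDD_go_eq_rep (fuel : Nat) (l acc : List Char) (h : l.length ≤ fuel) :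
    PySem.Chars.replace.go ['_', '_'] ['_'] fuel l acc = acc.reverse ++ pvRepDD l := by
  induction fuel generalizing l acc with
  | zero =>
    have : l = [] := List.eq_nil_of_length_eq_zero (Nat.le_zero.mp h)
    subst this; simp [PySem.Chars.replace.go, pvRepDD]
  | succ n ih =>
    match l with
    | [] => simp [PySem.Chars.replace.go, pvRepDD]
    | c :: t =>
      by_cases hp : List.isPrefixOf ['_', '_'] (c :: t)
      · obtain ⟨c2, t', rfl⟩ : ∃ c2 t', t = c2 :: t' := by
          cases t with
          | nil => simp [List.isPrefixOf] at hp
          | cons a b => exact ⟨a, b, rfl⟩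
        have hc : c = '_' ∧ c2 = '_' := by
          have := hp; simp [List.isPrefixOf] at this
          exact ⟨this.1.symm, this.2.symm⟩
        obtain ⟨rfl, rfl⟩ := hc
        have ht : t'.length ≤ n := by simp at h; omega
        simp only [PySem.Chars.replace.go, hp, if_true]
        rw [show List.drop ['_', '_'].length ('_' :: '_' :: t') = t' from rfl,
            show (['_'].reverse ++ acc) = '_' :: acc from rfl, ih _ _ ht]
        simp [pvRepDD]
      · have ht : t.length ≤ n := by simp at h; omega
        simp only [PySem.Chars.replace.go, hp]
        rw [if_neg (by simpa using hp), ih _ _ ht]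
        cases t with
        | nil => simp [pvRepDD]
        | cons a b =>
          have hne : ¬ (c = '_' ∧ a = '_') := by
            rintro ⟨rfl, rfl⟩; simp [List.isPrefixOf] at hp
          simp [pvRepDD, hne]

theorem pvReplaceDD_eq_rep (cs : List Char) :
    PySem.Chars.replace cs ['_', '_'] ['_'] = pvRepDD cs := by
  simpa [PySem.Chars.replace] using pvReplaceDD_go_eq_rep cs.length cs [] le_rfl

theorem pvHasDD_iff_infix (cs : List Char) : pvHasDD cs = true ↔ ['_', '_'] <:+: cs := by
  induction cs using pvHasDD.induct with
  | case1 => simp [pvHasDD]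
  | case2 c =>
    rw [show pvHasDD [c] = false from rfl]
    simp only [Bool.false_eq_true, false_iff]
    intro h
    have := h.length_le; simp at this
  | case3 c c2 t hcc =>
    obtain ⟨rfl, rfl⟩ := hcc
    rw [show pvHasDD ('_' :: '_' :: t) = true by simp [pvHasDD]]
    simp only [true_iff]
    exact (List.prefix_append ['_', '_'] t).isInfix
  | case4 c c2 t hcc ih =>
    rw [show pvHasDD (c :: c2 :: t) = pvHasDD (c2 :: t) by simp [pvHasDD, hcc]]
    rw [List.infix_cons_iff, ih]
    constructor
    · exact Or.inr
    · rintro (⟨r, hr⟩ | h)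
      · exfalso
        apply hcc
        simp only [List.cons_append, List.nil_append, List.cons.injEq] at hr
        exact ⟨hr.1.symm, hr.2.1.symm⟩
      · exact h

theorem pvRepDD_length_le (cs : List Char) : (pvRepDD cs).length ≤ cs.length := by
  induction cs using pvRepDD.induct with
  | case1 => simp [pvRepDD]
  | case2 c => simp [pvRepDD]
  | case3 c c2 t h ih => obtain ⟨rfl, rfl⟩ := h; simp [pvRepDD]; omega
  | case4 c c2 t h ih => simp [pvRepDD, h]; simpa using ih

theorem pvRepDD_length_lt (cs : List Char) (h : pvHasDD cs = true) :
    (pvRepDD cs).length < cs.length := by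
  induction cs using pvRepDD.induct with
  | case1 => simp [pvHasDD] at h
  | case2 c => exact absurd h (by rw [show pvHasDD [c] = false from rfl]; simp)
  | case3 c c2 t hc ih =>
    obtain ⟨rfl, rfl⟩ := hc
    have hle := pvRepDD_length_le t
    simp [pvRepDD]; omega
  | case4 c c2 t hc ih =>
    rw [show pvHasDD (c :: c2 :: t) = pvHasDD (c2 :: t) by simp [pvHasDD, hc]] at h
    have := ih h
    rw [show pvRepDD (c :: c2 :: t) = c :: pvRepDD (c2 :: t) by simp [pvRepDD, hc]]
    simp only [List.length_cons] at this ⊢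
    omega

theorem pvLoop_dec (s : String) (h : PySem.Str.isIn "__" s = true) :
    (PySem.Str.replace s "__" "_").toList.length < s.toList.length := by
  have hi : ['_', '_'] <:+: s.toList := by
    have := (PySem.Str.isIn_iff_infix "__" s).mp h
    simpa using this
  have hd : pvHasDD s.toList = true := (pvHasDD_iff_infix s.toList).mpr hi
  rw [show (PySem.Str.replace s "__" "_").toList
        = PySem.Chars.replace s.toList "__".toList "_".toList from PySem.Str.toList_replace ..]
  rw [show ("__".toList : List Char) = ['_', '_'] from rfl,
      show ("_".toList : List Char) = ['_'] from rfl, pvReplaceDD_eq_rep]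
  exact pvRepDD_length_lt _ hd

-- while "__" in normalized: normalized = normalized.replace("__", "_")
def pvWhileDD (normalized : String) : String :=
  if PySem.Str.isIn "__" normalized then pvWhileDD (PySem.Str.replace normalized "__" "_")
  else normalized
termination_by normalized.toList.length
decreasing_by exact pvLoop_dec _ (by assumption)

def normalize_command_py (command : String) : String :=
  -- isinstance(command, str) always holds for a String argument, so the early return is dead here
  let normalized := PySem.Str.lower (PySem.Str.strip command)
  let normalized := PySem.Str.replace (PySem.Str.replace (PySem.Str.replace normalized "-" "_") "." "_") " " "_"
  pvWhileDD normalized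

-- ===== PORT B =====
def normalize_command_py_alt (command : String) : String :=
  let s := PySem.Str.lower (PySem.Str.strip command)
  let out := s.toList.foldl (fun out ch =>
      let ch := if ch = '-' ∨ ch = '.' ∨ ch = ' ' then '_' else ch
      if ch = '_' ∧ out ≠ [] ∧ out.getLast? = some '_' then out else out ++ [ch]) []
  -- ''.join over single characters is exactly String.ofList
  String.ofList out

-- ===== PRECONDITION & SPEC =====
def Spec_normalize_command_py (command : String) (out : String) : Prop := out = normalize_command_py_alt command
instance (command : String) (out : String) : Decidable (Spec_normalize_command_py command out) := by unfold Spec_normalize_command_py; infer_instance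

-- ===== CLAIM (what is proved, stated in full; the proofs are below) =====
def Claim_equal_normalize_command_py : Prop := ∀ (command : String), Dom_normalize_command_py command → Spec_normalize_command_py command (normalize_command_py command)

-- ===== LEMMAS AND PROOFS =====

-- canonical run-collapser both programs compute
def pvCollapse : List Char → List Char
  | [] => []
  | [c] => [c]
  | c :: c2 :: t => if c = '_' ∧ c2 = '_' then pvCollapse (c2 :: t) else c :: pvCollapse (c2 :: t)

theorem pvCollapse_of_not_hasDD (cs : List Char) (h : pvHasDD cs = false) : pvCollapse cs = cs := by
  induction cs using pvCollapse.induct with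
  | case1 => rfl
  | case2 c => rfl
  | case3 c c2 t hc ih => obtain ⟨rfl, rfl⟩ := hc; simp [pvHasDD] at h
  | case4 c c2 t hc ih =>
    have h2 : pvHasDD (c2 :: t) = false := by simpa [pvHasDD, hc] using h
    simp [pvCollapse, hc, ih h2]

theorem pvCollapse_cons_rep (cs : List Char) : ∀ c, pvCollapse (c :: pvRepDD cs) = pvCollapse (c :: cs) := by
  induction cs using pvRepDD.induct with
  | case1 => intro c; rfl
  | case2 a => intro c; rfl
  | case3 c c2 t hc ih =>
    obtain ⟨rfl, rfl⟩ := hc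
    intro c
    rw [show pvRepDD ('_' :: '_' :: t) = '_' :: pvRepDD t by simp [pvRepDD]]
    by_cases hcu : c = '_'
    · subst hcu
      rw [show pvCollapse ('_' :: '_' :: pvRepDD t) = pvCollapse ('_' :: pvRepDD t) by simp [pvCollapse],
          show pvCollapse ('_' :: '_' :: '_' :: t) = pvCollapse ('_' :: '_' :: t) by simp [pvCollapse],
          show pvCollapse ('_' :: '_' :: t) = pvCollapse ('_' :: t) by simp [pvCollapse]]
      exact ih '_'
    · rw [show pvCollapse (c :: '_' :: pvRepDD t) = c :: pvCollapse ('_' :: pvRepDD t) by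
            simp [pvCollapse, hcu],
          show pvCollapse (c :: '_' :: '_' :: t) = c :: pvCollapse ('_' :: '_' :: t) by
            simp [pvCollapse, hcu],
          show pvCollapse ('_' :: '_' :: t) = pvCollapse ('_' :: t) by simp [pvCollapse]]
      rw [ih '_']
  | case4 a a2 t hc ih =>
    intro c
    rw [show pvRepDD (a :: a2 :: t) = a :: pvRepDD (a2 :: t) by simp [pvRepDD, hc]]
    by_cases hca : c = '_' ∧ a = '_'
    · rw [show pvCollapse (c :: a :: pvRepDD (a2 :: t)) = pvCollapse (a :: pvRepDD (a2 :: t)) by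
            simp [pvCollapse, hca],
          show pvCollapse (c :: a :: a2 :: t) = pvCollapse (a :: a2 :: t) by simp [pvCollapse, hca]]
      exact ih a
    · rw [show pvCollapse (c :: a :: pvRepDD (a2 :: t)) = c :: pvCollapse (a :: pvRepDD (a2 :: t)) by
            simp [pvCollapse, hca],
          show pvCollapse (c :: a :: a2 :: t) = c :: pvCollapse (a :: a2 :: t) by simp [pvCollapse, hca]]
      rw [ih a]

theorem pvCollapse_rep (cs : List Char) : pvCollapse (pvRepDD cs) = pvCollapse cs := by
  induction cs using pvRepDD.induct with
  | case1 => rfl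
  | case2 c => rfl
  | case3 c c2 t hc _ =>
    obtain ⟨rfl, rfl⟩ := hc
    rw [show pvRepDD ('_' :: '_' :: t) = '_' :: pvRepDD t by simp [pvRepDD],
        pvCollapse_cons_rep t '_',
        show pvCollapse ('_' :: '_' :: t) = pvCollapse ('_' :: t) by simp [pvCollapse]]
  | case4 a a2 t hc _ =>
    rw [show pvRepDD (a :: a2 :: t) = a :: pvRepDD (a2 :: t) by simp [pvRepDD, hc],
        pvCollapse_cons_rep (a2 :: t) a]

theorem pvWhileDD_toList (s : String) : (pvWhileDD s).toList = pvCollapse s.toList := by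
  induction s using pvWhileDD.induct with
  | case1 s h ih =>
    rw [pvWhileDD, if_pos h, ih,
        show (PySem.Str.replace s "__" "_").toList
          = PySem.Chars.replace s.toList "__".toList "_".toList from PySem.Str.toList_replace ..,
        show ("__".toList : List Char) = ['_', '_'] from rfl,
        show ("_".toList : List Char) = ['_'] from rfl,
        pvReplaceDD_eq_rep, pvCollapse_rep]
  | case2 s h =>
    rw [pvWhileDD, if_neg h]
    have hd : pvHasDD s.toList = false := by
      rw [← Bool.not_eq_true, pvHasDD_iff_infix]
      intro hi
      exact h ((PySem.Str.isIn_iff_infix "__" s).mpr (by simpa using hi))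
    exact (pvCollapse_of_not_hasDD _ hd).symm

-- single-char replace is a map
theorem pvReplace_single_go (o n : Char) (fuel : Nat) (l acc : List Char) (h : l.length ≤ fuel) :
    PySem.Chars.replace.go [o] [n] fuel l acc
      = acc.reverse ++ l.map (fun c => if c = o then n else c) := by
  induction fuel generalizing l acc with
  | zero =>
    have : l = [] := List.eq_nil_of_length_eq_zero (Nat.le_zero.mp h)
    subst this; simp [PySem.Chars.replace.go]
  | succ m ih =>
    match l with
    | [] => simp [PySem.Chars.replace.go]
    | c :: t =>
      have ht : t.length ≤ m := by simp at h; omega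
      by_cases hp : List.isPrefixOf [o] (c :: t)
      · have hc : c = o := by
          have := hp; simp [List.isPrefixOf] at this; exact this.symm
        simp only [PySem.Chars.replace.go, hp, if_true]
        rw [show List.drop ([o] : List Char).length (c :: t) = t from rfl,
            show (([n] : List Char).reverse ++ acc) = n :: acc from rfl, ih _ _ ht]
        simp [hc]
      · have hc : ¬ c = o := by
          intro he; exact hp (by simp [List.isPrefixOf, he])
        simp only [PySem.Chars.replace.go]
        rw [if_neg (by simpa using hp), ih _ _ ht]
        simp [hc]

theorem pvReplace_single (cs : List Char) (o n : Char) :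
    PySem.Chars.replace cs [o] [n] = cs.map (fun c => if c = o then n else c) := by
  simpa [PySem.Chars.replace] using pvReplace_single_go o n cs.length cs [] le_rfl

-- the three chained single-char replaces are one map
theorem pvTripleReplace_toList (s : String) :
    (PySem.Str.replace (PySem.Str.replace (PySem.Str.replace s "-" "_") "." "_") " " "_").toList
      = s.toList.map (fun c => if c = '-' ∨ c = '.' ∨ c = ' ' then '_' else c) := by
  rw [show (PySem.Str.replace (PySem.Str.replace (PySem.Str.replace s "-" "_") "." "_") " " "_").toList
        = PySem.Chars.replace (PySem.Str.replace (PySem.Str.replace s "-" "_") "." "_").toList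
            " ".toList "_".toList from PySem.Str.toList_replace ..,
      show (PySem.Str.replace (PySem.Str.replace s "-" "_") "." "_").toList
        = PySem.Chars.replace (PySem.Str.replace s "-" "_").toList ".".toList "_".toList from
          PySem.Str.toList_replace ..,
      show (PySem.Str.replace s "-" "_").toList
        = PySem.Chars.replace s.toList "-".toList "_".toList from PySem.Str.toList_replace ..]
  rw [show ("-".toList : List Char) = ['-'] from rfl, show (".".toList : List Char) = ['.'] from rfl,
      show (" ".toList : List Char) = [' '] from rfl, show ("_".toList : List Char) = ['_'] from rfl,
      pvReplace_single, pvReplace_single, pvReplace_single, List.map_map, List.map_map]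
  refine List.map_congr_left ?_
  intro c _
  by_cases h1 : c = '-' <;> by_cases h2 : c = '.' <;> by_cases h3 : c = ' ' <;>
    simp_all [Function.comp]

-- B's tail pass, with the last appended character as state
def pvTc : Char → List Char → List Char
  | _, [] => []
  | last, y :: t => if y = '_' ∧ last = '_' then pvTc last t else y :: pvTc y t

theorem pvCollapse_cons_tc (t : List Char) : ∀ y, pvCollapse (y :: t) = y :: pvTc y t := by
  induction t with
  | nil => intro y; rfl
  | cons b t' ih =>
    intro y
    by_cases h : y = '_' ∧ b = '_'
    · obtain ⟨rfl, rfl⟩ := h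
      rw [show pvCollapse ('_' :: '_' :: t') = pvCollapse ('_' :: t') by simp [pvCollapse],
          show pvTc '_' ('_' :: t') = pvTc '_' t' by simp [pvTc]]
      exact ih '_'
    · rw [show pvCollapse (y :: b :: t') = y :: pvCollapse (b :: t') by simp [pvCollapse, h],
          show pvTc y (b :: t') = b :: pvTc b t' by
            simp only [pvTc, if_neg (by tauto : ¬ (b = '_' ∧ y = '_'))],
          ih b]

theorem pvFoldl_g (m : List Char) :
    ∀ (acc : List Char) (c : Char), acc.getLast? = some c →
      m.foldl (fun out ch =>
          if ch = '_' ∧ out ≠ [] ∧ out.getLast? = some '_' then out else out ++ [ch]) acc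
        = acc ++ pvTc c m := by
  induction m with
  | nil => intro acc c _; simp [pvTc]
  | cons y t ih =>
    intro acc c hlast
    have hne : acc ≠ [] := by intro h; subst h; simp at hlast
    by_cases h : y = '_' ∧ c = '_'
    · obtain ⟨rfl, rfl⟩ := h
      rw [List.foldl_cons, if_pos ⟨rfl, hne, hlast⟩,
          show pvTc '_' ('_' :: t) = pvTc '_' t by simp [pvTc], ih acc '_' hlast]
    · have hcond : ¬ ('_' = '_' ∧ acc ≠ [] ∧ acc.getLast? = some '_') ∨ y ≠ '_' := by
        by_cases hy : y = '_'
        · subst hy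
          left; rintro ⟨-, -, hl⟩
          rw [hlast] at hl
          exact h ⟨rfl, (Option.some.injEq _ _ ▸ hl).symm ▸ rfl⟩
        · right; exact hy
      have hstep : (if y = '_' ∧ acc ≠ [] ∧ acc.getLast? = some '_' then acc else acc ++ [y])
          = acc ++ [y] := by
        rcases hcond with hc | hy
        · by_cases hy : y = '_'
          · subst hy; exact if_neg hc
          · exact if_neg (by tauto)
        · exact if_neg (by tauto)
      rw [List.foldl_cons, hstep,
          show pvTc c (y :: t) = y :: pvTc y t by
            simp only [pvTc, if_neg (by tauto : ¬ (y = '_' ∧ c = '_'))],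
          ih (acc ++ [y]) y (by simp)]
      simp

theorem pvFoldl_g_nil (m : List Char) :
    m.foldl (fun out ch =>
        if ch = '_' ∧ out ≠ [] ∧ out.getLast? = some '_' then out else out ++ [ch]) []
      = pvCollapse m := by
  cases m with
  | nil => rfl
  | cons y t =>
    rw [List.foldl_cons, show (if y = '_' ∧ ([] : List Char) ≠ [] ∧ ([] : List Char).getLast? = some '_'
          then ([] : List Char) else [] ++ [y]) = [y] by simp,
        pvFoldl_g t [y] y (by simp), pvCollapse_cons_tc]
    rfl

-- ===== VERDICT (by name: the statement is the Claim_ definition above) =====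
theorem normalize_command_py_spec : Claim_equal_normalize_command_py := by
  intro command _
  unfold Spec_normalize_command_py normalize_command_py normalize_command_py_alt
  refine String.toList_inj.mp ?_
  show (pvWhileDD _).toList = _
  rw [pvWhileDD_toList, pvTripleReplace_toList, String.toList_ofList]
  rw [show List.foldl
        (fun out ch =>
          let ch := if ch = '-' ∨ ch = '.' ∨ ch = ' ' then '_' else ch
          if ch = '_' ∧ out ≠ [] ∧ out.getLast? = some '_' then out else out ++ [ch])
        ([] : List Char) (PySem.Str.lower (PySem.Str.strip command)).toList
      = List.foldl
          (fun out ch => if ch = '_' ∧ out ≠ [] ∧ out.getLast? = some '_' then out else out ++ [ch])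
          ([] : List Char)
          (List.map (fun c => if c = '-' ∨ c = '.' ∨ c = ' ' then '_' else c)
            (PySem.Str.lower (PySem.Str.strip command)).toList) from
      (List.foldl_map (f := fun c => if c = '-' ∨ c = '.' ∨ c = ' ' then '_' else c)
        (g := fun out ch => if ch = '_' ∧ out ≠ [] ∧ out.getLast? = some '_' then out else out ++ [ch])).symm]
  exact (pvFoldl_g_nil _).symm
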